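-- pv_equiv track=rewrite | github.com/ScrollPrize/villa | ink-detection/preprocessing/create_2d_zarr.py | _pyramid_shapes
-- ===== SOURCE A (Python) =====
-- from typing import Dict, Iterable, List, Literal, Sequence
--
-- def _pyramid_shapes(image_shape: tuple[int, int], levels: int) -> List[tuple[int, int, int]]:
--     if levels < 1:
--         raise ValueError("levels must be at least 1")
--
--     height, width = image_shape
--     shapes: List[tuple[int, int, int]] = []
--     for _ in range(levels):
--         shapes.append((1, height, width))
--         height = (height + 1) // 2
--         width = (width + 1) // 2
--     return shapes
-- ===== SOURCE B (Python) =====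
-- from typing import List
--
-- def _pyramid_shapes(image_shape: tuple[int, int], levels: int) -> List[tuple[int, int, int]]:
--     if levels < 1:
--         raise ValueError("levels must be at least 1")
--     height, width = image_shape
--     # level i is ceil(dim / 2**i), computed via the shift trick -(-x >> i)
--     return [(1, -(-height >> i), -(-width >> i)) for i in range(levels)]
-- ===== Notes on version B (the rewrite author's own statement) =====
-- stated objective: alternative
-- what changed: Replaces the stateful halving recurrence over (height, width) with a stateless per-level closed form ceil(dim/2^i), computed directly from the original dimensions as -(-dim >> i); Pre_ excludes levels < 1, where both implementations raise ValueError.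
import Mathlib
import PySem

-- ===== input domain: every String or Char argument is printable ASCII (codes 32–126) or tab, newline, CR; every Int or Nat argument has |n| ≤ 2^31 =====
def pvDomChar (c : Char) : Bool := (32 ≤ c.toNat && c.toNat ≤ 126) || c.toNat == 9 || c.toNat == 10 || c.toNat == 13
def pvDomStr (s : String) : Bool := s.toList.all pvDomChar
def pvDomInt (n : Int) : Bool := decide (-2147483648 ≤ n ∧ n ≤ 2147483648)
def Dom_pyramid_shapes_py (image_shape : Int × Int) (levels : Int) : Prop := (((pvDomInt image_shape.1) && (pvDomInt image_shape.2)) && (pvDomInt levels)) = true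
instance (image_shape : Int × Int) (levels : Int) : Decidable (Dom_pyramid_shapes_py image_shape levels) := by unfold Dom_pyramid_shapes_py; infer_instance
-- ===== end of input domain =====

-- B replaces A's stateful halving recurrence with a stateless per-level closed form ceil(dim/2^i) via -(-dim >> i) (objective: alternative decomposition, same cost).


-- ===== PORT A =====
-- the for-loop of A as structural recursion over the iteration count, carrying (height, width)
def pyA_loop (h w : Int) : Nat → List (Int × Int × Int)
  | 0 => []
  | n + 1 => (1, h, w) :: pyA_loop (PySem.Int.floordiv (h + 1) 2) (PySem.Int.floordiv (w + 1) 2) n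

def pyramid_shapes_py (image_shape : Int × Int) (levels : Int) : List (Int × Int × Int) :=
  pyA_loop image_shape.1 image_shape.2 levels.toNat

-- ===== PORT B =====
-- Python's 'x >> i' on int is floor division by 2^i, ported exactly as floordiv x (2^i)
def pyramid_shapes_py_alt (image_shape : Int × Int) (levels : Int) : List (Int × Int × Int) :=
  (List.range levels.toNat).map (fun i =>
    (1, -(PySem.Int.floordiv (-image_shape.1) (2 ^ i)),
        -(PySem.Int.floordiv (-image_shape.2) (2 ^ i))))

-- ===== PRECONDITION & SPEC =====
-- A raises ValueError when levels < 1 (and B raises the same); exactly those inputs are excluded.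
def Pre_pyramid_shapes_py (image_shape : Int × Int) (levels : Int) : Prop := 1 ≤ levels
instance (image_shape : Int × Int) (levels : Int) : Decidable (Pre_pyramid_shapes_py image_shape levels) := by unfold Pre_pyramid_shapes_py; infer_instance
def pvWitness_pyramid_shapes_py : (Int × Int) × Int := ((5, 8), 3)

def Spec_pyramid_shapes_py (image_shape : Int × Int) (levels : Int) (out : List (Int × Int × Int)) : Prop := out = pyramid_shapes_py_alt image_shape levels
instance (image_shape : Int × Int) (levels : Int) (out : List (Int × Int × Int)) : Decidable (Spec_pyramid_shapes_py image_shape levels out) := by unfold Spec_pyramid_shapes_py; infer_instance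

-- ===== CLAIM (what is proved, stated in full; the proofs are below) =====
def Claim_equal_pyramid_shapes_py : Prop := ∀ (image_shape : Int × Int) (levels : Int), Dom_pyramid_shapes_py image_shape levels → Pre_pyramid_shapes_py image_shape levels → Spec_pyramid_shapes_py image_shape levels (pyramid_shapes_py image_shape levels)

-- ===== LEMMAS AND PROOFS =====

-- ceiling-nesting: one halving step of A folded into B's closed form (holds for ALL integers h)
theorem ceil_step (h : Int) (i : Nat) :
    -(PySem.Int.floordiv (-(PySem.Int.floordiv (h + 1) 2)) (2 ^ i))
      = -(PySem.Int.floordiv (-h) (2 ^ (i + 1))) := by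
  have hd : (0:Int) < 2 ^ i := by positivity
  set d : Int := 2 ^ i with hdd
  have hpow : (2:Int) ^ (i + 1) = 2 * d := by rw [hdd]; ring
  rw [hpow]
  set c : Int := PySem.Int.floordiv (h + 1) 2 with hc
  set q : Int := -(PySem.Int.floordiv (-h) (2 * d)) with hq
  have hcb : c * 2 ≤ h + 1 ∧ h + 1 < (c + 1) * 2 := by
    rw [hc, ← PySem.Int.floordiv_eq_iff_of_pos (by omega)]
  have hqb : (q - 1) * (2 * d) < h ∧ h ≤ q * (2 * d) := by
    rw [hq, ← PySem.Int.neg_floordiv_neg_eq_iff_of_pos (by positivity)]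
  rw [PySem.Int.neg_floordiv_neg_eq_iff_of_pos hd]
  constructor
  · nlinarith [hcb.1, hqb.1]
  · nlinarith [hcb.2, hqb.2]

theorem loop_eq_map (n : Nat) (h w : Int) :
    pyA_loop h w n = (List.range n).map (fun i =>
      (1, -(PySem.Int.floordiv (-h) (2 ^ i)),
          -(PySem.Int.floordiv (-w) (2 ^ i)))) := by
  induction n generalizing h w with
  | zero => rfl
  | succ n ih =>
    rw [List.range_succ_eq_map]
    simp only [pyA_loop, List.map_cons, List.map_map]
    congr 1
    · simp [PySem.Int.floordiv]
    · rw [ih]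
      apply List.map_congr_left
      intro i _
      simp only [Function.comp]
      rw [ceil_step h i, ceil_step w i]

-- ===== VERDICT (by name: the statement is the Claim_ definition above) =====
theorem pyramid_shapes_py_spec : Claim_equal_pyramid_shapes_py := by
  intro image_shape levels _ _
  unfold Spec_pyramid_shapes_py pyramid_shapes_py pyramid_shapes_py_alt
  rw [loop_eq_map]
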